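-- pv_equiv track=rewrite | github.com/tdye19/EstimatingEngine | apex/backend/agents/agent_3_gap_analysis.py | _is_truncated
-- ===== SOURCE A (Python) =====
-- def _is_truncated(content: str) -> bool:
--     """Return True if the LLM response was cut off mid-string.
--
--     Heuristic: find the last '}' and count unescaped double-quotes that follow.
--     An odd count means there is an unterminated string literal — the model hit
--     its max_tokens ceiling before closing the JSON structure.
--     """
--     stripped = content.strip()
--     last_brace = stripped.rfind("}")
--     if last_brace == -1:
--         return True
--     tail = stripped[last_brace + 1 :]
--     quote_count = 0
--     i = 0
--     while i < len(tail):
--         if tail[i] == "\\":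
--             i += 2
--             continue
--         if tail[i] == '"':
--             quote_count += 1
--         i += 1
--     return quote_count % 2 == 1
-- ===== SOURCE B (Python) =====
-- def _is_truncated(content: str) -> bool:
--     """Split-based re-implementation: split the tail on backslashes and count
--     quotes per piece (an escaped char is the first char of a piece), instead of
--     a char-by-char index-skipping scan."""
--     stripped = content.strip()
--     last_brace = stripped.rfind("}")
--     if last_brace == -1:
--         return True
--     pieces = stripped[last_brace + 1 :].split("\\")
--     quotes = pieces[0].count('"')
--     escaped_bs = False
--     for p in pieces[1:]:
--         if escaped_bs:
--             quotes += p.count('"')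
--             escaped_bs = False
--         elif p == "":
--             escaped_bs = True
--         else:
--             quotes += p[1:].count('"')
--     return quotes % 2 == 1
-- ===== Notes on version B (the rewrite author's own statement) =====
-- stated objective: alternative
-- what changed: Replaces A's stateful char-by-char index-skipping scan of the tail with a split-on-backslash pass followed by per-piece quote counting (escaped characters are the first char of each piece).
import Mathlib
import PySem

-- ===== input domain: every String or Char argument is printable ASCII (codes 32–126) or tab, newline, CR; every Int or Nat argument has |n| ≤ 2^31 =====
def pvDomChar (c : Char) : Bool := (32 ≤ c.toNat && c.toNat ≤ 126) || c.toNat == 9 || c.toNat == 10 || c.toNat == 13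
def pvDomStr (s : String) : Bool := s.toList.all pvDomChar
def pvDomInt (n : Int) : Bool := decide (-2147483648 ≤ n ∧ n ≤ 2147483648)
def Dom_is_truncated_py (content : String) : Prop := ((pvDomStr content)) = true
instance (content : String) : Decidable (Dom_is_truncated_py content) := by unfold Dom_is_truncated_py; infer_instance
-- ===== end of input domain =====

-- B replaces A's stateful index-skipping quote scan of the tail by splitting the tail on
-- backslashes and counting quotes piece-wise (a different decomposition; same linear cost).

-- ===== PORT A =====
-- the while-loop of A: state (i, quote_count), indexing into tail
def pvLoopA (tl : List Char) (i q : Nat) : Nat :=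
  if h : i < tl.length then
    if tl[i] = '\\' then pvLoopA tl (i + 2) q
    else if tl[i] = '"' then pvLoopA tl (i + 1) (q + 1)
    else pvLoopA tl (i + 1) q
  else q
termination_by tl.length - i

def is_truncated_py (content : String) : Bool :=
  let stripped := PySem.Str.strip content
  let last_brace := PySem.Str.rfind stripped "}"
  if last_brace = -1 then true
  else
    let tail := (PySem.Str.slice stripped (some (last_brace + 1)) none).toList
    pvLoopA tail 0 0 % 2 == 1

-- ===== PORT B =====
-- the body of B's for-loop over pieces[1:], state (quotes, escaped_bs)
def pvStepB (st : Nat × Bool) (p : List Char) : Nat × Bool :=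
  if st.2 then (st.1 + p.count '"', false)
  else if p = [] then (st.1, true)
  else (st.1 + (p.drop 1).count '"', false)

-- str.split on the 1-char separator "\\" is List.splitOn '\\'; str.count of a 1-char
-- needle is List.count (both exact for single-character arguments)
def is_truncated_py_alt (content : String) : Bool :=
  let stripped := PySem.Str.strip content
  let last_brace := PySem.Str.rfind stripped "}"
  if last_brace = -1 then true
  else
    let pieces := ((PySem.Str.slice stripped (some (last_brace + 1)) none).toList).splitOn '\\'
    -- pieces[0]: split never returns an empty list, so headD's default is unreachable
    let quotes := (pieces.headD []).count '"'
    let r := (pieces.drop 1).foldl pvStepB (quotes, false)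
    r.1 % 2 == 1

-- ===== PRECONDITION & SPEC =====
def Spec_is_truncated_py (content : String) (out : Bool) : Prop := out = is_truncated_py_alt content
instance (content : String) (out : Bool) : Decidable (Spec_is_truncated_py content out) := by unfold Spec_is_truncated_py; infer_instance

-- ===== CLAIM (what is proved, stated in full; the proofs are below) =====
def Claim_equal_is_truncated_py : Prop := ∀ (content : String), Dom_is_truncated_py content → Spec_is_truncated_py content (is_truncated_py content)

-- ===== LEMMAS AND PROOFS =====
-- clean recursive form of A's scan
def pvScanQ : List Char → Nat
  | [] => 0
  | c :: rest =>
      if c = '\\' then pvScanQ rest.tail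
      else (if c = '"' then 1 else 0) + pvScanQ rest
termination_by l => l.length
decreasing_by
  all_goals simp [List.length_tail]

-- recursive form of B's fold over the pieces after the first
def pvGoB : List (List Char) → Bool → Nat
  | [], _ => 0
  | p :: ps, true => p.count '"' + pvGoB ps false
  | p :: ps, false => if p = [] then pvGoB ps true else (p.drop 1).count '"' + pvGoB ps false

def pvCountB (ps : List (List Char)) : Nat := (ps.headD []).count '"' + pvGoB (ps.drop 1) false

theorem pvLoopA_eq (tl : List Char) (i q : Nat) : pvLoopA tl i q = q + pvScanQ (tl.drop i) := by
  fun_induction pvLoopA tl i q with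
  | case1 i q h hc ih =>
      rw [ih]
      conv_rhs => rw [List.drop_eq_getElem_cons h, pvScanQ]
      rw [if_pos hc, List.tail_drop]
  | case2 i q h hc hq ih =>
      rw [ih]
      conv_rhs => rw [List.drop_eq_getElem_cons h, pvScanQ]
      rw [if_neg hc, if_pos hq]
      omega
  | case3 i q h hc hq ih =>
      rw [ih]
      conv_rhs => rw [List.drop_eq_getElem_cons h, pvScanQ]
      rw [if_neg hc, if_neg hq]
      omega
  | case4 i q h =>
      rw [List.drop_eq_nil_of_le (by omega)]
      simp [pvScanQ]

theorem pvFoldB_eq (ps : List (List Char)) (q : Nat) (b : Bool) :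
    (ps.foldl pvStepB (q, b)).1 = q + pvGoB ps b := by
  induction ps generalizing q b with
  | nil => simp [pvGoB]
  | cons p ps ih =>
      cases b with
      | true =>
          have h1 : pvStepB (q, true) p = (q + p.count '"', false) := by simp [pvStepB]
          rw [List.foldl_cons, h1, ih]
          simp [pvGoB, Nat.add_assoc]
      | false =>
          by_cases hp : p = []
          · subst hp
            have h1 : pvStepB (q, false) [] = (q, true) := by simp [pvStepB]
            rw [List.foldl_cons, h1, ih]
            simp [pvGoB]
          · have h1 : pvStepB (q, false) p = (q + (p.drop 1).count '"', false) := by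
              simp [pvStepB, hp]
            rw [List.foldl_cons, h1, ih]
            simp [pvGoB, hp, Nat.add_assoc]

theorem pvScanQ_eq (l : List Char) : pvScanQ l = pvCountB (l.splitOnP (· == '\\')) := by
  fun_induction pvScanQ l with
  | case1 => simp [List.splitOnP_nil, pvCountB, pvGoB]
  | case2 rest ih =>
      rw [ih, List.splitOnP_cons, if_pos (by decide)]
      cases rest with
      | nil => simp [List.splitOnP_nil, pvCountB, pvGoB]
      | cons d r' =>
          obtain ⟨p, ps, hps⟩ : ∃ p ps, r'.splitOnP (· == '\\') = p :: ps := by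
            cases h : r'.splitOnP (· == '\\') with
            | nil => exact absurd h (List.splitOnP_ne_nil _ _)
            | cons p ps => exact ⟨p, ps, rfl⟩
          rw [List.tail_cons, List.splitOnP_cons]
          by_cases hd : d = '\\'
          · rw [if_pos (by simp [hd]), hps]
            simp [pvCountB, pvGoB]
          · rw [if_neg (by simp [hd]), hps]
            simp [pvCountB, pvGoB]
  | case3 c rest hc ih =>
      obtain ⟨p, ps, hps⟩ : ∃ p ps, rest.splitOnP (· == '\\') = p :: ps := by
        cases h : rest.splitOnP (· == '\\') with
        | nil => exact absurd h (List.splitOnP_ne_nil _ _)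
        | cons p ps => exact ⟨p, ps, rfl⟩
      rw [ih, List.splitOnP_cons, if_neg (show ¬((c == '\\') = true) by simp [hc]), hps]
      simp only [List.modifyHead, pvCountB, List.headD, List.drop_one, List.tail_cons,
        List.count_cons]
      by_cases hq : c = '"' <;> simp [hq] <;> omega

-- ===== VERDICT (by name: the statement is the Claim_ definition above) =====
theorem is_truncated_py_spec : Claim_equal_is_truncated_py := by
  intro content _
  unfold Spec_is_truncated_py is_truncated_py is_truncated_py_alt
  by_cases h : PySem.Str.rfind (PySem.Str.strip content) "}" = -1
  · rw [if_pos h, if_pos h]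
  · rw [if_neg h, if_neg h]
    simp only [pvLoopA_eq, pvFoldB_eq, List.drop_zero, Nat.zero_add]
    rw [pvScanQ_eq]
    simp only [pvCountB, List.splitOn]
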